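-- pv_equiv track=rewrite | github.com/AdamZhouSE/pythonHomework | Code/CodeRecords/2588/59140/300494.py | factoring
-- ===== SOURCE A (Python) =====
-- from math import sqrt
--
-- def digitsum(n):
--     sum=0
--     while n>0:
--         sum+=n%10
--         n=n//10
--     return sum
--
-- def factoring(n):
--     primes=[i for i in range(2,n) if 0 not in [i%d for d in range(2,int(sqrt(i))+1)]]
--     result=[]
--     for p in primes:
--         while n!=1:
--             if n%p==0:
--                 n = n // p
--                 result.append(p)
--             else:break
--     if len(result)<=1:return -1
--     sum=0
--     for i in result:
--         sum+=digitsum(i)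
--     return sum
-- ===== SOURCE B (Python) =====
-- from math import isqrt
--
-- def digitsum(n):
--     s = 0
--     while n > 0:
--         s += n % 10
--         n = n // 10
--     return s
--
-- def factoring(n):
--     # trial division up to sqrt(n): O(sqrt n) instead of A's O(n*sqrt n)
--     if n < 2:
--         return -1
--     s = 0
--     count = 0
--     m = n
--     for d in range(2, isqrt(n) + 1):
--         while m % d == 0:
--             s += digitsum(d)
--             count += 1
--             m //= d
--     if m > 1:
--         s += digitsum(m)
--         count += 1
--     return s if count >= 2 else -1
-- ===== Notes on version B (the rewrite author's own statement) =====
-- stated objective: faster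
-- what changed: Replaces A's generation of all primes below n (each tested by trial division) followed by repeated division with a single trial-division factorization loop up to isqrt(n) plus a leftover-prime check.
import Mathlib
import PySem

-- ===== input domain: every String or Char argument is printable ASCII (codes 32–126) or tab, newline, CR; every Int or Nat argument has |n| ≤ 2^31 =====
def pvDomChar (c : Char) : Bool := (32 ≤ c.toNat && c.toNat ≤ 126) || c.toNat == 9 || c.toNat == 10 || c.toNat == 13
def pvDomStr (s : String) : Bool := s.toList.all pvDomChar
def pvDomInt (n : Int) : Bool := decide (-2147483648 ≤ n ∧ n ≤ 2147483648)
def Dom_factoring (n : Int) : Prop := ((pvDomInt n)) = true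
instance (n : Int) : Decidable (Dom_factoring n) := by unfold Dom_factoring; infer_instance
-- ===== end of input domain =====

-- B replaces A's O(n·√n) prime-list generation + division with one O(√n) trial-division factorization.

-- ===== PORT A =====
-- shared helper of both Pythons: digitsum(n) — while n>0: sum += n%10; n //= 10
def digitsumLoop (n acc : Int) : Int :=
  if h : 0 < n then digitsumLoop (PySem.Int.floordiv n 10) (acc + PySem.Int.mod n 10) else acc
termination_by n.toNat
decreasing_by
  have h10 : (10 : Int) = ((10 : Nat) : Int) := by norm_num
  have hn : n = ((n.toNat : Nat) : Int) := by omega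
  rw [hn, h10, PySem.Int.floordiv_natCast]
  simp only [Int.toNat_natCast]
  exact Nat.div_lt_self (by omega) (by norm_num)

def digitsum (n : Int) : Int := digitsumLoop n 0

-- int(sqrt(i)) of A (and math.isqrt(n) of B): exact as the integer square root for the
-- 0 ≤ i ≤ 2^31 of Dom_factoring (a correctly rounded double sqrt cannot cross an integer there)
def pyIntSqrt (i : Int) : Int := Int.ofNat (Nat.sqrt i.toNat)

-- A's primality filter: 0 not in [i % d for d in range(2, int(sqrt(i))+1)]
def isPrimeA (i : Int) : Bool :=
  !(((PySem.List.pyRange 2 (pyIntSqrt i + 1) 1).map (fun d => PySem.Int.mod i d)).contains 0)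

-- A's inner loop: while n!=1: if n%p==0: n //= p; result.append(p) else: break
def divLoop (p : Int) (m : Int) (res : List Int) : Int × List Int :=
  if m ≠ 1 then
    if PySem.Int.mod m p = 0 then
      -- totality guard: it holds at every call A's loop actually reaches (there 1 < m and 2 ≤ p)
      if h : 1 < m ∧ 2 ≤ p then
        divLoop p (PySem.Int.floordiv m p) (res ++ [p])
      else (m, res)
    else (m, res)
  else (m, res)
termination_by m.toNat
decreasing_by
  have hm : m = ((m.toNat : Nat) : Int) := by omega
  have hp2 : p = ((p.toNat : Nat) : Int) := by omega
  rw [hm, hp2, PySem.Int.floordiv_natCast]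
  simp only [Int.toNat_natCast]
  exact Nat.div_lt_self (by omega) (by omega)

def factoring (n : Int) : Int :=
  let primes := (PySem.List.pyRange 2 n 1).filter isPrimeA
  let st := primes.foldl (fun (st : Int × List Int) p => divLoop p st.1 st.2) (n, [])
  if st.2.length ≤ 1 then -1
  else st.2.foldl (fun s i => s + digitsum i) 0

-- ===== PORT B =====
-- B's inner loop on state (m, s, count): while m % d == 0: s += digitsum(d); count += 1; m //= d
def divAll (d : Int) (st : Int × Int × Int) : Int × Int × Int :=
  if PySem.Int.mod st.1 d = 0 then
    -- totality guard: it holds at every call B's loop actually reaches (there 1 < m and 2 ≤ d)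
    if h : 1 < st.1 ∧ 2 ≤ d then
      divAll d (PySem.Int.floordiv st.1 d, st.2.1 + digitsum d, st.2.2 + 1)
    else st
  else st
termination_by st.1.toNat
decreasing_by
  try dsimp only
  have hm : st.1 = ((st.1.toNat : Nat) : Int) := by omega
  have hd2 : d = ((d.toNat : Nat) : Int) := by omega
  rw [hm, hd2, PySem.Int.floordiv_natCast]
  simp only [Int.toNat_natCast]
  exact Nat.div_lt_self (by omega) (by omega)

def factoring_alt (n : Int) : Int :=
  if n < 2 then -1
  else
    let st := (PySem.List.pyRange 2 (pyIntSqrt n + 1) 1).foldl (fun st d => divAll d st) (n, 0, 0)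
    let st2 := if 1 < st.1 then (st.2.1 + digitsum st.1, st.2.2 + 1) else (st.2.1, st.2.2)
    if 2 ≤ st2.2 then st2.1 else -1

-- ===== PRECONDITION & SPEC =====
def Spec_factoring (n : Int) (out : Int) : Prop := out = factoring_alt n
instance (n : Int) (out : Int) : Decidable (Spec_factoring n out) := by unfold Spec_factoring; infer_instance

-- ===== CLAIM (what is proved, stated in full; the proofs are below) =====
def Claim_equal_factoring : Prop := ∀ (n : Int), Dom_factoring n → Spec_factoring n (factoring n)

-- ===== LEMMAS AND PROOFS =====

-- the least-prime-factor cons step of primeFactorsList, for 2 ≤ M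
lemma factors_cons_minFac {M : Nat} (h : 2 ≤ M) :
    M.primeFactorsList = M.minFac :: (M / M.minFac).primeFactorsList := by
  obtain ⟨m, rfl⟩ : ∃ m, M = m + 2 := ⟨M - 2, by omega⟩
  exact Nat.primeFactorsList_add_two m

lemma minFac_eq_of_le {M d : Nat} (hd : d.Prime) (hdvd : d ∣ M) (hM : 0 < M)
    (hmin : ∀ q : Nat, q.Prime → q ∣ M → d ≤ q) : M.minFac = d := by
  have hM1 : M ≠ 1 := by
    rintro rfl; exact hd.one_lt.ne' (Nat.dvd_one.mp hdvd)
  exact le_antisymm (Nat.minFac_le_of_dvd hd.two_le hdvd)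
    (hmin _ (Nat.minFac_prime hM1) (Nat.minFac_dvd M))

-- a composite d cannot divide an M all of whose prime factors are ≥ d
lemma not_dvd_of_composite {M d : Nat} (hd2 : 2 ≤ d) (hnp : ¬ d.Prime)
    (hmin : ∀ q : Nat, q.Prime → q ∣ M → (d:Int) ≤ (q:Int)) : ¬ d ∣ M := by
  intro hdvd
  have hq : d.minFac.Prime := Nat.minFac_prime (by omega)
  have h1 : d.minFac ∣ M := (Nat.minFac_dvd d).trans hdvd
  have h2 : (d:Int) ≤ d.minFac := hmin _ hq h1
  have h3 : d.minFac < d := (Nat.not_prime_iff_minFac_lt (by omega)).mp hnp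
  omega

-- A's primality test is correct for 2 ≤ i
lemma isPrimeA_iff {i : Nat} (h : 2 ≤ i) : isPrimeA (i : Int) = true ↔ i.Prime := by
  have hform : isPrimeA (i : Int) = true ↔
      ∀ x ∈ PySem.List.pyRange 2 ((Nat.sqrt i : Int) + 1) 1, ¬ ((x : Int) ∣ (i : Int)) := by
    unfold isPrimeA pyIntSqrt
    simp [Int.toNat_natCast, PySem.Int.mod_eq_zero_iff_dvd]
  rw [hform, Nat.prime_def_le_sqrt]
  constructor
  · intro hc
    refine ⟨h, fun m hm2 hms hdvd => hc (m : Int) ?_ (Int.natCast_dvd_natCast.mpr hdvd)⟩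
    rw [PySem.List.mem_pyRange_one]
    constructor
    · exact_mod_cast hm2
    · omega
  · rintro ⟨-, hp⟩ x hx hdvd
    rw [PySem.List.mem_pyRange_one] at hx
    have hx' : x = ((x.toNat : Nat) : Int) := by omega
    rw [hx', Int.natCast_dvd_natCast] at hdvd
    exact hp x.toNat (by omega) (by omega) hdvd

-- proof-side abbreviations: the collected factors as Ints, and their digit-sum total
def castList (R : List Nat) : List Int := R.map (fun r => Int.ofNat r)
def dsSum (R : List Nat) : Int := (R.map (fun r => digitsum (Int.ofNat r))).sum

@[simp] lemma castList_nil : castList [] = [] := rfl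
@[simp] lemma castList_append (R1 R2 : List Nat) :
    castList (R1 ++ R2) = castList R1 ++ castList R2 := by simp [castList]
@[simp] lemma castList_length (R : List Nat) : (castList R).length = R.length := by
  simp [castList]
@[simp] lemma dsSum_nil : dsSum [] = 0 := rfl
@[simp] lemma dsSum_cons (p : Nat) (R : List Nat) :
    dsSum (p :: R) = digitsum (p : Int) + dsSum R := by
  simp [dsSum, Int.ofNat_eq_natCast]
@[simp] lemma dsSum_append (R1 R2 : List Nat) :
    dsSum (R1 ++ R2) = dsSum R1 + dsSum R2 := by simp [dsSum]

-- specification of A's inner while loop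
lemma divLoop_spec (p : Nat) (hp : p.Prime) :
    ∀ (M : Nat), 0 < M → (∀ q : Nat, q.Prime → q ∣ M → p ≤ q) → ∀ (res : List Int),
    ∃ (M' : Nat) (R : List Nat),
      divLoop (p : Int) (M : Int) res = ((M' : Int), res ++ castList R) ∧
      R ++ M'.primeFactorsList = M.primeFactorsList ∧ 0 < M' ∧
      (∀ q : Nat, q.Prime → q ∣ M' → p < q) := by
  intro M
  induction M using Nat.strong_induction_on with
  | _ M ih =>
    intro hM hmin res
    by_cases hM1 : M = 1
    · subst hM1
      refine ⟨1, [], ?_, by simp, by norm_num,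
        fun q hq hdvd => absurd (Nat.dvd_one.mp hdvd) (by simpa using hq.one_lt.ne')⟩
      rw [divLoop]
      simp [castList]
    · have hM2 : 2 ≤ M := by omega
      by_cases hdvd : p ∣ M
      · have hkey : divLoop (p : Int) (M : Int) res
            = divLoop (p : Int) ((M / p : Nat) : Int) (res ++ [(p : Int)]) := by
          rw [divLoop, if_pos (by exact_mod_cast hM1), if_pos (by
              rw [PySem.Int.mod_eq_zero_iff_dvd]; exact_mod_cast hdvd),
            dif_pos ⟨by exact_mod_cast hM2, by exact_mod_cast hp.two_le⟩,
            PySem.Int.floordiv_natCast]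
        have hlt : M / p < M := Nat.div_lt_self hM hp.one_lt
        have hpos' : 0 < M / p := Nat.div_pos (Nat.le_of_dvd hM hdvd) hp.pos
        have hmin' : ∀ q : Nat, q.Prime → q ∣ M / p → p ≤ q :=
          fun q hq hdv => hmin q hq (hdv.trans (Nat.div_dvd_of_dvd hdvd))
        obtain ⟨M', R, heq, hfac, hpos, hgt⟩ := ih _ hlt hpos' hmin' (res ++ [(p : Int)])
        refine ⟨M', p :: R, ?_, ?_, hpos, hgt⟩
        · rw [hkey, heq]; simp [castList, Int.ofNat_eq_natCast]
        · have hminfac : M.minFac = p := minFac_eq_of_le hp hdvd hM hmin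
          rw [factors_cons_minFac hM2, hminfac, List.cons_append, hfac]
      · refine ⟨M, [], ?_, by simp, hM, ?_⟩
        · rw [divLoop, if_pos (by exact_mod_cast hM1), if_neg (by
            rw [PySem.Int.mod_eq_zero_iff_dvd]
            exact fun hc => hdvd (by exact_mod_cast hc))]
          simp
        · intro q hq hdv
          have hle := hmin q hq hdv
          rcases lt_or_eq_of_le hle with hlt | rfl
          · exact hlt
          · exact absurd hdv hdvd

-- specification of B's inner while loop
lemma divAll_spec (p : Nat) (hp : p.Prime) :
    ∀ (M : Nat), 0 < M → (∀ q : Nat, q.Prime → q ∣ M → p ≤ q) → ∀ (s c : Int),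
    ∃ (M' : Nat) (R : List Nat),
      divAll (p : Int) ((M : Int), s, c) =
        ((M' : Int), s + dsSum R, c + R.length) ∧
      R ++ M'.primeFactorsList = M.primeFactorsList ∧ 0 < M' ∧
      (∀ q : Nat, q.Prime → q ∣ M' → p < q) := by
  intro M
  induction M using Nat.strong_induction_on with
  | _ M ih =>
    intro hM hmin s c
    by_cases hM1 : M = 1
    · subst hM1
      refine ⟨1, [], ?_, by simp, by norm_num,
        fun q hq hdvd => absurd (Nat.dvd_one.mp hdvd) (by simpa using hq.one_lt.ne')⟩
      rw [divAll.eq_def]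
      try dsimp only
      rw [if_neg (by
        rw [PySem.Int.mod_eq_zero_iff_dvd]
        intro hc
        have hc' : p ∣ 1 := by exact_mod_cast hc
        exact absurd (Nat.dvd_one.mp hc') hp.one_lt.ne')]
      simp
    · have hM2 : 2 ≤ M := by omega
      by_cases hdvd : p ∣ M
      · have hkey : divAll (p : Int) ((M : Int), s, c)
            = divAll (p : Int) (((M / p : Nat) : Int), s + digitsum (p : Int), c + 1) := by
          rw [divAll.eq_def]
          try dsimp only
          rw [if_pos (by
              rw [PySem.Int.mod_eq_zero_iff_dvd]; exact_mod_cast hdvd),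
            dif_pos ⟨by exact_mod_cast hM2, by exact_mod_cast hp.two_le⟩,
            PySem.Int.floordiv_natCast]
        have hlt : M / p < M := Nat.div_lt_self hM hp.one_lt
        have hpos' : 0 < M / p := Nat.div_pos (Nat.le_of_dvd hM hdvd) hp.pos
        have hmin' : ∀ q : Nat, q.Prime → q ∣ M / p → p ≤ q :=
          fun q hq hdv => hmin q hq (hdv.trans (Nat.div_dvd_of_dvd hdvd))
        obtain ⟨M', R, heq, hfac, hpos, hgt⟩ := ih _ hlt hpos' hmin' (s + digitsum (p : Int)) (c + 1)
        refine ⟨M', p :: R, ?_, ?_, hpos, hgt⟩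
        · rw [hkey, heq]
          simp only [dsSum_cons, List.length_cons, Prod.mk.injEq]
          refine ⟨trivial, by ring, by push_cast; ring⟩
        · have hminfac : M.minFac = p := minFac_eq_of_le hp hdvd hM hmin
          rw [factors_cons_minFac hM2, hminfac, List.cons_append, hfac]
      · refine ⟨M, [], ?_, by simp, hM, ?_⟩
        · rw [divAll.eq_def]
          try dsimp only
          rw [if_neg (by
            rw [PySem.Int.mod_eq_zero_iff_dvd]
            exact fun hc => hdvd (by exact_mod_cast hc))]
          simp
        · intro q hq hdv
          have hle := hmin q hq hdv
          rcases lt_or_eq_of_le hle with hlt | rfl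
          · exact hlt
          · exact absurd hdv hdvd

-- A's fold over the (filtered) range of candidate divisors
lemma foldA_spec (k : Nat) : ∀ (d : Int), 2 ≤ d → ∀ (M : Nat) (res : List Int), 0 < M →
    (∀ q : Nat, q.Prime → q ∣ M → d ≤ (q : Int)) →
    ∃ (M' : Nat) (R : List Nat),
      (PySem.List.pyRange d (d + k) 1).foldl
          (fun (st : Int × List Int) p => if isPrimeA p then divLoop p st.1 st.2 else st)
          ((M : Int), res)
        = ((M' : Int), res ++ castList R) ∧
      R ++ M'.primeFactorsList = M.primeFactorsList ∧ 0 < M' ∧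
      (∀ q : Nat, q.Prime → q ∣ M' → d + k ≤ (q : Int)) := by
  induction k with
  | zero =>
    intro d hd M res hM hmin
    refine ⟨M, [], ?_, by simp, hM, by simpa using hmin⟩
    rw [show d + ((0 : Nat) : Int) = d by simp, PySem.List.pyRange_one_eq_nil (le_refl d)]
    simp [castList]
  | succ k ih =>
    intro d hd M res hM hmin
    have hdcast : ((d.toNat : Nat) : Int) = d := by omega
    have hsplit : d + ((k + 1 : Nat) : Int) = (d + 1) + (k : Int) := by push_cast; ring
    rw [PySem.List.pyRange_one_cons (by omega), List.foldl_cons, hsplit]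
    by_cases hdp : d.toNat.Prime
    · have hiP : isPrimeA d = true := by
        rw [← hdcast]; exact (isPrimeA_iff (by omega)).mpr hdp
      rw [if_pos hiP]
      obtain ⟨M1, R1, heq1, hfac1, hpos1, hgt1⟩ :=
        divLoop_spec d.toNat hdp M hM (fun q hq hdv => by
          have := hmin q hq hdv; omega) res
      rw [hdcast] at heq1
      rw [heq1]
      obtain ⟨M', R2, heq2, hfac2, hpos2, hgt2⟩ :=
        ih (d + 1) (by omega) M1 (res ++ castList R1) hpos1
          (fun q hq hdv => by have := hgt1 q hq hdv; omega)
      refine ⟨M', R1 ++ R2, ?_, ?_, hpos2, fun q hq hdv => hgt2 q hq hdv⟩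
      · rw [heq2]; simp [castList]
      · rw [← hfac1, List.append_assoc, hfac2]
    · have hiP : isPrimeA d = false := by
        rw [← hdcast]
        by_contra hc
        exact hdp ((isPrimeA_iff (by omega)).mp (Bool.not_eq_false _ ▸ (by
          revert hc; cases isPrimeA ((d.toNat : Nat) : Int) <;> simp)))
      rw [if_neg (by simp [hiP])]
      refine ih (d + 1) (by omega) M res hM (fun q hq hdv => ?_)
      have h1 := hmin q hq hdv
      rcases eq_or_lt_of_le h1 with heq | hlt
      · exfalso
        have : q = d.toNat := by omega
        exact hdp (this ▸ hq)
      · omega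

-- B's fold over the range of candidate divisors
lemma foldB_spec (k : Nat) : ∀ (d : Int), 2 ≤ d → ∀ (M : Nat) (s c : Int), 0 < M →
    (∀ q : Nat, q.Prime → q ∣ M → d ≤ (q : Int)) →
    ∃ (M' : Nat) (R : List Nat),
      (PySem.List.pyRange d (d + k) 1).foldl (fun st p => divAll p st) ((M : Int), s, c)
        = ((M' : Int), s + dsSum R, c + R.length) ∧
      R ++ M'.primeFactorsList = M.primeFactorsList ∧ 0 < M' ∧
      (∀ q : Nat, q.Prime → q ∣ M' → d + k ≤ (q : Int)) := by
  induction k with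
  | zero =>
    intro d hd M s c hM hmin
    refine ⟨M, [], ?_, by simp, hM, by simpa using hmin⟩
    rw [show d + ((0 : Nat) : Int) = d by simp, PySem.List.pyRange_one_eq_nil (le_refl d)]
    simp [dsSum]
  | succ k ih =>
    intro d hd M s c hM hmin
    have hdcast : ((d.toNat : Nat) : Int) = d := by omega
    have hsplit : d + ((k + 1 : Nat) : Int) = (d + 1) + (k : Int) := by push_cast; ring
    rw [PySem.List.pyRange_one_cons (by omega), List.foldl_cons, hsplit]
    by_cases hdp : d.toNat.Prime
    · obtain ⟨M1, R1, heq1, hfac1, hpos1, hgt1⟩ :=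
        divAll_spec d.toNat hdp M hM (fun q hq hdv => by
          have := hmin q hq hdv; omega) s c
      rw [hdcast] at heq1
      rw [heq1]
      obtain ⟨M', R2, heq2, hfac2, hpos2, hgt2⟩ :=
        ih (d + 1) (by omega) M1 (s + dsSum R1)
          (c + R1.length) hpos1 (fun q hq hdv => by have := hgt1 q hq hdv; omega)
      refine ⟨M', R1 ++ R2, ?_, ?_, hpos2, fun q hq hdv => hgt2 q hq hdv⟩
      · rw [heq2]
        simp only [dsSum_append, List.length_append, Prod.mk.injEq]
        refine ⟨trivial, by ring, by push_cast; ring⟩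
      · rw [← hfac1, List.append_assoc, hfac2]
    · have hndvd : ¬ (d.toNat ∣ M) :=
        not_dvd_of_composite (by omega) hdp (fun q hq hdv => hdcast ▸ hmin q hq hdv)
      have hid : divAll d ((M : Int), s, c) = ((M : Int), s, c) := by
        rw [divAll.eq_def]
        try dsimp only
        rw [if_neg (by
          rw [PySem.Int.mod_eq_zero_iff_dvd, ← hdcast]
          exact fun hc => hndvd (by exact_mod_cast hc))]
      rw [hid]
      refine ih (d + 1) (by omega) M s c hM (fun q hq hdv => ?_)
      have h1 := hmin q hq hdv
      rcases eq_or_lt_of_le h1 with heq | hlt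
      · exfalso
        have : q = d.toNat := by omega
        exact hdp (this ▸ hq)
      · omega

-- closed forms of the two ports for n ≥ 2
-- a composite N ≥ 2 has at least two prime factors with multiplicity
lemma two_le_factors_len {N : Nat} (h : 2 ≤ N) (hnp : ¬ N.Prime) :
    2 ≤ N.primeFactorsList.length := by
  have hmf : N.minFac.Prime := Nat.minFac_prime (by omega)
  have hdvd := Nat.minFac_dvd N
  have hlt : N.minFac < N := (Nat.not_prime_iff_minFac_lt h).mp hnp
  have hq : N / N.minFac ≠ 1 := by
    intro hc
    have h2 := Nat.div_mul_cancel hdvd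
    rw [hc, one_mul] at h2
    omega
  have hpos : 0 < N / N.minFac := Nat.div_pos (Nat.minFac_le (by omega)) hmf.pos
  have hne : (N / N.minFac).primeFactorsList ≠ [] :=
    (Nat.primeFactorsList_ne_nil _).mpr (by omega)
  rw [factors_cons_minFac h]
  cases hl : (N / N.minFac).primeFactorsList with
  | nil => exact absurd hl hne
  | cons a t => simp

lemma factoring_eq (N : Nat) (h : 2 ≤ N) :
    factoring (N : Int) =
      if N.Prime then -1
      else dsSum N.primeFactorsList := by
  obtain ⟨M', R, heq, hfac, hpos, hgt⟩ :=
    foldA_spec (N - 2) 2 (by norm_num) N [] (by omega)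
      (fun q hq _ => by exact_mod_cast hq.two_le)
  rw [show (2 : Int) + ((N - 2 : Nat) : Int) = (N : Int) by omega] at heq
  have hgt' : ∀ q : Nat, q.Prime → q ∣ M' → N ≤ q := by
    intro q hq hdv
    have := hgt q hq hdv
    omega
  have hfold : ((PySem.List.pyRange 2 (N : Int) 1).filter isPrimeA).foldl
      (fun (st : Int × List Int) p => divLoop p st.1 st.2) ((N : Int), [])
      = ((M' : Int), [] ++ castList R) := by
    rw [List.foldl_filter]
    exact heq
  unfold factoring
  simp only [hfold, List.nil_append]
  rcases Nat.lt_or_ge 1 M' with hM'2 | hM'1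
  · -- leftover M' ≥ 2: N must be prime, and nothing was collected
    have hq := Nat.minFac_prime (by omega : M' ≠ 1)
    have hqd := Nat.minFac_dvd M'
    have hNq : N ≤ M'.minFac := hgt' _ hq hqd
    have hmem : M'.minFac ∈ N.primeFactorsList := by
      rw [← hfac]
      exact List.mem_append_right R ((Nat.mem_primeFactorsList (by omega)).mpr ⟨hq, hqd⟩)
    have hqN : M'.minFac = N :=
      le_antisymm (Nat.le_of_mem_primeFactorsList hmem) hNq
    have hNp : N.Prime := hqN ▸ hq
    have hfn : N.primeFactorsList = [N] := Nat.primeFactorsList_prime hNp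
    have hne : M'.primeFactorsList ≠ [] := (Nat.primeFactorsList_ne_nil M').mpr (by omega)
    have hR : R = [] := by
      cases R with
      | nil => rfl
      | cons a t =>
        exfalso
        rw [hfn, List.cons_append] at hfac
        injection hfac with h1 h2
        rcases t with _ | ⟨b, t'⟩ <;> simp_all
    subst hR
    simp [hNp, castList]
  · -- M' = 1: everything was collected, R is the full factor list
    have hM'1 : M' = 1 := by omega
    subst hM'1
    rw [Nat.primeFactorsList_one, List.append_nil] at hfac
    subst hfac
    by_cases hNp : N.Prime
    · simp [hNp, Nat.primeFactorsList_prime hNp, castList]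
    · have hlen : 2 ≤ N.primeFactorsList.length := two_le_factors_len h hNp
      rw [if_neg hNp, if_neg (by simp only [castList_length]; omega)]
      rw [PySem.List.foldl_add]
      simp [castList, dsSum, List.map_map, Function.comp_def, Int.ofNat_eq_natCast]

lemma factoring_alt_eq (N : Nat) (h : 2 ≤ N) :
    factoring_alt (N : Int) =
      if N.Prime then -1
      else dsSum N.primeFactorsList := by
  have hs1 : 1 ≤ N.sqrt := Nat.sqrt_pos.mpr (by omega)
  obtain ⟨M', R, heq, hfac, hpos, hgt⟩ :=
    foldB_spec (N.sqrt - 1) 2 (by norm_num) N 0 0 (by omega)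
      (fun q hq _ => by exact_mod_cast hq.two_le)
  rw [show (2 : Int) + ((N.sqrt - 1 : Nat) : Int) = (N.sqrt : Int) + 1 by omega] at heq
  have hgt' : ∀ q : Nat, q.Prime → q ∣ M' → N.sqrt + 1 ≤ q := by
    intro q hq hdv
    have := hgt q hq hdv
    omega
  have hMdvd : M' ∣ N := by
    have hprod := congrArg List.prod hfac
    rw [List.prod_append, Nat.prod_primeFactorsList (by omega : M' ≠ 0),
      Nat.prod_primeFactorsList (by omega : N ≠ 0)] at hprod
    exact Dvd.intro_left _ hprod
  have hMle : M' ≤ N := Nat.le_of_dvd (by omega) hMdvd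
  have hsq : pyIntSqrt (N : Int) = (N.sqrt : Int) := by simp [pyIntSqrt]
  unfold factoring_alt
  rw [if_neg (by omega : ¬ (N : Int) < 2)]
  simp only [hsq, heq]
  try dsimp only
  by_cases hM'2 : 1 < M'
  · -- leftover M' > 1: it must itself be prime (all its prime factors exceed √N)
    have hM'p : M'.Prime := by
      rw [Nat.prime_def_minFac]
      refine ⟨by omega, ?_⟩
      by_contra hne
      have hq : M'.minFac.Prime := Nat.minFac_prime (by omega)
      have hqd : M'.minFac ∣ M' := Nat.minFac_dvd M'
      have hqlt : M'.minFac < M' := lt_of_le_of_ne (Nat.minFac_le (by omega)) hne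
      have hmul : M'.minFac * (M' / M'.minFac) = M' := Nat.mul_div_cancel' hqd
      have hcpos : 0 < M' / M'.minFac := Nat.div_pos (Nat.minFac_le (by omega)) hq.pos
      have hc1 : M' / M'.minFac ≠ 1 := by
        intro hc
        rw [hc, mul_one] at hmul
        omega
      have hq2 : (M' / M'.minFac).minFac.Prime := Nat.minFac_prime (by omega)
      have hq2d : (M' / M'.minFac).minFac ∣ M' :=
        (Nat.minFac_dvd _).trans (Nat.div_dvd_of_dvd hqd)
      have hb1 : N.sqrt + 1 ≤ M'.minFac := hgt' _ hq hqd
      have hb2 : N.sqrt + 1 ≤ (M' / M'.minFac).minFac := hgt' _ hq2 hq2d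
      have hb3 : (M' / M'.minFac).minFac ≤ M' / M'.minFac :=
        Nat.le_of_dvd hcpos (Nat.minFac_dvd _)
      have h1 : N < (N.sqrt + 1) * (N.sqrt + 1) := Nat.lt_succ_sqrt N
      have h2 : (N.sqrt + 1) * (N.sqrt + 1) ≤ M'.minFac * (M' / M'.minFac).minFac :=
        Nat.mul_le_mul hb1 hb2
      have h3 : M'.minFac * (M' / M'.minFac).minFac ≤ M'.minFac * (M' / M'.minFac) :=
        Nat.mul_le_mul_left _ hb3
      have : N < M' := by
        calc N < (N.sqrt + 1) * (N.sqrt + 1) := h1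
          _ ≤ M'.minFac * (M' / M'.minFac).minFac := h2
          _ ≤ M'.minFac * (M' / M'.minFac) := h3
          _ = M' := hmul
      omega
    rw [if_pos (show (1 : Int) < (M' : Int) by exact_mod_cast hM'2)]
    try dsimp only
    rw [Nat.primeFactorsList_prime hM'p] at hfac
    by_cases hNp : N.Prime
    · -- then the factor list is [N] = R ++ [M'], so R = []
      rw [Nat.primeFactorsList_prime hNp] at hfac
      have hR : R = [] := by
        cases R with
        | nil => rfl
        | cons a t =>
          exfalso
          rw [List.cons_append] at hfac
          injection hfac with h1 h2
          rcases t with _ | ⟨b, t'⟩ <;> simp_all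
      subst hR
      rw [if_pos hNp, if_neg (by simp)]
    · have hlen : 2 ≤ N.primeFactorsList.length := two_le_factors_len h hNp
      have hRlen : R.length + 1 = N.primeFactorsList.length := by
        have := congrArg List.length hfac
        simpa using this
      rw [if_neg hNp, if_pos (by omega)]
      rw [← hfac]
      simp only [dsSum_append, dsSum_cons, dsSum_nil]
      ring
  · -- leftover M' = 1: R is already the full factor list
    have hM'1 : M' = 1 := by omega
    subst hM'1
    rw [Nat.primeFactorsList_one, List.append_nil] at hfac
    subst hfac
    have hone : ¬ ((1 : Int) < ((1 : Nat) : Int)) := by norm_num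
    rw [if_neg hone]
    try dsimp only
    by_cases hNp : N.Prime
    · rw [if_pos hNp, if_neg (by rw [Nat.primeFactorsList_prime hNp]; simp)]
    · have hlen : 2 ≤ N.primeFactorsList.length := two_le_factors_len h hNp
      rw [if_neg hNp, if_pos (by omega)]
      ring

-- ===== VERDICT (by name: the statement is the Claim_ definition above) =====
theorem factoring_spec : Claim_equal_factoring := by
  intro n _
  unfold Spec_factoring
  by_cases h2 : 2 ≤ n
  · have hN : ((n.toNat : Nat) : Int) = n := Int.toNat_of_nonneg (by omega)
    have h2N : 2 ≤ n.toNat := by omega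
    rw [← hN, factoring_eq _ h2N, factoring_alt_eq _ h2N]
  · -- n < 2: A's prime list is empty so result = [] → -1; B returns -1 by its guard
    have hA : factoring n = -1 := by
      unfold factoring
      rw [PySem.List.pyRange_one_eq_nil (by omega)]
      simp
    have hB : factoring_alt n = -1 := by
      unfold factoring_alt
      rw [if_pos (by omega)]
    rw [hA, hB]
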